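-- pv_equiv track=rewrite | github.com/mshahshah/ZYNQ-ZCU102-project-examples | src/framework/utils.py | drop_bad_words_from_list
-- ===== SOURCE A (Python) =====
-- def drop_bad_words_from_list(dataset):
--     bad_words = ['sum(','max(','min(','np','mean(','.','(',')', ' ']
--     dataset_header = dataset[0]
--     new_dataset_header = []
--     for aBadWord in bad_words:
--         dataset_header = [i.replace(aBadWord, '') for i in dataset_header]
--
--     for i in range(len(dataset[0])):
--         dataset[0][i] = dataset_header[i]
--     return dataset
-- ===== SOURCE B (Python) =====
-- def drop_bad_words_from_list(dataset):
--     bad_words = ['sum(','max(','min(','np','mean(','.','(',')', ' ']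
--     def clean(s, words):
--         if not words:
--             return s
--         return clean(''.join(s.split(words[0])), words[1:])
--     dataset[0][:] = [clean(s, bad_words) for s in dataset[0]]
--     return dataset
-- ===== Notes on version B (the rewrite author's own statement) =====
-- stated objective: alternative
-- what changed: B removes each bad word by splitting the string on it and joining the pieces (''.join(s.split(w))) inside a recursion over the word list, and slice-assigns the cleaned header back in one comprehension, instead of A's k whole-list str.replace passes plus a separate index copy loop; Pre_ excludes the empty dataset, on which both raise IndexError.
import Mathlib
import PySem

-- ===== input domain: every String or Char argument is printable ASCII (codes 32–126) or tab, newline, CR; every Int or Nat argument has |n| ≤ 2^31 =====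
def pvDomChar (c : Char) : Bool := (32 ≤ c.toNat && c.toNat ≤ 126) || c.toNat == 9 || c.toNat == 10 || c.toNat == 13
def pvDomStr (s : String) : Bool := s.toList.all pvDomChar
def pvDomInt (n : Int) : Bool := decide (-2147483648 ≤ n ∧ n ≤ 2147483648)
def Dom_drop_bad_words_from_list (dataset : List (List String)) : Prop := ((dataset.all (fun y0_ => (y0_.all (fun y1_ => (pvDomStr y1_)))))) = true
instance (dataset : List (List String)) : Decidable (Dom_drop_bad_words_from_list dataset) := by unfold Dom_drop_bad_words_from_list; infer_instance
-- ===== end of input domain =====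

-- B removes each bad word via split-and-join (''.join(s.split(w))) in a recursion over the word
-- list and slice-assigns the cleaned header in one comprehension, instead of A's k whole-list
-- str.replace passes plus an index copy loop; both mutate dataset[0] in place to the same contents,
-- and the theorems are about the returned value.


def pvBadWords : List String := ["sum(", "max(", "min(", "np", "mean(", ".", "(", ")", " "]

-- ===== PORT A =====
def drop_bad_words_from_list (dataset : List (List String)) : List (List String) :=
  match dataset with
  | [] => []   -- Python raises IndexError here; excluded by Pre_
  | h :: t =>
    -- k passes: each bad word rewrites the whole header list
    let header := pvBadWords.foldl (fun hd w => hd.map (fun s => PySem.Str.replace s w "")) h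
    -- copy loop: dataset[0][i] = dataset_header[i]
    let h' := (List.range h.length).foldl (fun acc i => acc.set i (header.getD i "")) h
    h' :: t

-- ===== PORT B =====
-- clean(s, words): recursion over the word list, each step ''.join(s.split(w))
def pvClean : String → List String → String
  | s, [] => s
  | s, w :: ws => pvClean (PySem.Str.join "" ((PySem.Str.split? s w).getD [])) ws

def drop_bad_words_from_list_alt (dataset : List (List String)) : List (List String) :=
  match dataset with
  | [] => []   -- Python raises IndexError here; excluded by Pre_
  | h :: t => (h.map (fun s => pvClean s pvBadWords)) :: t

-- ===== PRECONDITION & SPEC =====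
-- Pre_ excludes the empty dataset, on which both A and B raise IndexError (dataset[0]).
def Pre_drop_bad_words_from_list (dataset : List (List String)) : Prop := dataset ≠ []
instance (dataset : List (List String)) : Decidable (Pre_drop_bad_words_from_list dataset) := by unfold Pre_drop_bad_words_from_list; infer_instance

def pvWitness_drop_bad_words_from_list : List (List String) := [["sum(x) ", "np.mean(y)"], ["1", "2"]]

def Spec_drop_bad_words_from_list (dataset : List (List String)) (out : List (List String)) : Prop := out = drop_bad_words_from_list_alt dataset
instance (dataset : List (List String)) (out : List (List String)) : Decidable (Spec_drop_bad_words_from_list dataset out) := by unfold Spec_drop_bad_words_from_list; infer_instance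

-- ===== CLAIM (what is proved, stated in full; the proofs are below) =====
def Claim_equal_drop_bad_words_from_list : Prop := ∀ (dataset : List (List String)), Dom_drop_bad_words_from_list dataset → Pre_drop_bad_words_from_list dataset → Spec_drop_bad_words_from_list dataset (drop_bad_words_from_list dataset)

-- ===== LEMMAS AND PROOFS =====

-- joining on the empty separator is flattening
theorem pv_join_nil (parts : List (List Char)) :
    PySem.Chars.join [] parts = parts.flatten := by
  induction parts with
  | nil => rfl
  | cons p ps ih =>
    cases ps with
    | nil => simp [PySem.Chars.join, List.intercalate]
    | cons q qs =>
      rw [PySem.Chars.join_cons_cons]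
      simp only [List.flatten_cons]
      rw [← List.flatten_cons, ih]
      simp

-- replace.go's accumulator holds the (reversed) output produced so far
theorem pv_rep_acc (sep : List Char) :
    ∀ (fuel : Nat) (l acc : List Char),
      PySem.Chars.replace.go sep [] fuel l acc = acc.reverse ++ PySem.Chars.replace.go sep [] fuel l [] := by
  intro fuel
  induction fuel with
  | zero => intro l acc; simp [PySem.Chars.replace.go]
  | succ n ih =>
    intro l acc
    cases l with
    | nil => simp [PySem.Chars.replace.go]
    | cons c t =>
      simp only [PySem.Chars.replace.go, List.reverse_nil, List.nil_append, List.append_nil]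
      split_ifs with hp
      · rw [ih _ acc]
      · rw [ih t (c :: acc), ih t [c]]
        simp

-- replace.go is fuel-irrelevant once fuel covers the remaining input
theorem pv_rep_fuel (sep : List Char) (hsep : sep ≠ []) :
    ∀ (fuel : Nat) (l acc : List Char), l.length ≤ fuel →
      PySem.Chars.replace.go sep [] (fuel + 1) l acc = PySem.Chars.replace.go sep [] fuel l acc := by
  intro fuel
  induction fuel with
  | zero =>
    intro l acc h
    have : l = [] := List.eq_nil_of_length_eq_zero (Nat.le_zero.mp h)
    subst this
    simp [PySem.Chars.replace.go]
  | succ n ih =>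
    intro l acc h
    cases l with
    | nil => simp [PySem.Chars.replace.go]
    | cons c t =>
      simp only [PySem.Chars.replace.go]
      split_ifs with hp
      · apply ih
        have h1 : 1 ≤ sep.length := by
          cases sep with | nil => exact absurd rfl hsep | cons a b => simp
        simp only [List.length_drop, List.length_cons] at h ⊢
        omega
      · apply ih
        simp at h ⊢; omega

-- flattening splitOn's pieces is deleting the separator
theorem pv_split_flatten (sep : List Char) :
    ∀ (fuel : Nat) (l cur : List Char) (acc : List (List Char)),
      (PySem.Chars.splitOn.go sep fuel l cur acc).flatten
        = acc.reverse.flatten ++ cur.reverse ++ PySem.Chars.replace.go sep [] fuel l [] := by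
  intro fuel
  induction fuel with
  | zero => intro l cur acc; simp [PySem.Chars.splitOn.go, PySem.Chars.replace.go]
  | succ n ih =>
    intro l cur acc
    cases l with
    | nil => simp [PySem.Chars.splitOn.go, PySem.Chars.replace.go]
    | cons c t =>
      simp only [PySem.Chars.splitOn.go, PySem.Chars.replace.go, List.reverse_nil,
        List.append_nil]
      split_ifs with hp
      · rw [ih]
        simp
      · rw [ih, pv_rep_acc sep n t [c]]
        simp

theorem pv_join_splitOn (s sep : List Char) (h : sep ≠ []) :
    PySem.Chars.join [] (PySem.Chars.splitOn s sep) = PySem.Chars.replace s sep [] := by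
  rw [pv_join_nil]
  unfold PySem.Chars.splitOn PySem.Chars.replace
  rw [pv_split_flatten sep]
  simp [h]
  rw [pv_rep_fuel sep h s.length s [] (le_refl _)]

-- one split/join step IS one replace-with-empty step (String level)
theorem pv_clean_step (s w : String) (hw : w.toList ≠ []) :
    PySem.Str.join "" ((PySem.Str.split? s w).getD []) = PySem.Str.replace s w "" := by
  have hsplit : PySem.Str.split? s w
      = some ((PySem.Chars.splitOn s.toList w.toList).map String.ofList) := by
    simp [PySem.Str.split?, PySem.Chars.split?, hw]
  rw [hsplit]
  simp only [Option.getD_some, PySem.Str.join, PySem.Str.replace, List.map_map]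
  have e1 : ("" : String).toList = [] := rfl
  rw [e1]
  have hid : (PySem.Chars.splitOn s.toList w.toList).map (String.toList ∘ String.ofList)
      = PySem.Chars.splitOn s.toList w.toList := by
    simp [Function.comp_def]
  rw [hid, pv_join_splitOn s.toList w.toList hw]

set_option maxRecDepth 8192 in
theorem pv_badwords_nonempty : ∀ w ∈ pvBadWords, w.toList ≠ [] := by decide

-- B's recursion over the word list = A's per-string replace fold
theorem pv_clean_eq_foldl (words : List String) (hw : ∀ w ∈ words, w.toList ≠ []) :
    ∀ (s : String), pvClean s words = words.foldl (fun s w => PySem.Str.replace s w "") s := by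
  induction words with
  | nil => intro s; rfl
  | cons w ws ih =>
    intro s
    simp only [pvClean, List.foldl_cons]
    rw [pv_clean_step s w (hw w (by simp))]
    exact ih (fun x hx => hw x (by simp [hx])) _

-- interchanging A's loops: folding words over the list = mapping the per-string fold
theorem pv_fold_map (ws : List String) (h : List String) :
    ws.foldl (fun hd w => hd.map (fun s => PySem.Str.replace s w "")) h
      = h.map (fun s => ws.foldl (fun s w => PySem.Str.replace s w "") s) := by
  induction ws generalizing h with
  | nil => simp
  | cons w ws ih =>
    simp [List.foldl_cons, ih, List.map_map, Function.comp]

-- the copy loop rewrites acc into header (prefix by prefix)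
theorem pv_copy_aux (header : List String) :
    ∀ (n : Nat) (acc : List String),
      ((List.range n).foldl (fun a i => a.set i (header.getD i "")) acc).length = acc.length ∧
      ∀ (j : Nat), ((List.range n).foldl (fun a i => a.set i (header.getD i "")) acc)[j]?
        = if j < n ∧ j < acc.length then some (header.getD j "") else acc[j]? := by
  intro n
  induction n with
  | zero => intro acc; simp
  | succ n ih =>
    intro acc
    have h1 := (ih acc).1
    have h2 := (ih acc).2
    constructor
    · rw [List.range_succ, List.foldl_append, List.foldl_cons, List.foldl_nil,
        List.length_set, h1]
    · intro j
      rw [List.range_succ, List.foldl_append, List.foldl_cons, List.foldl_nil,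
        List.getElem?_set, h1, h2 j]
      by_cases hnj : n = j
      · subst hnj
        by_cases hlt : n < acc.length
        · simp [hlt]
        · simp [hlt]
      · by_cases hjn : j < n
        · simp [hnj, hjn, (by omega : j < n + 1)]
        · simp [hnj, hjn]
          intro h _
          exact absurd h (by omega)

theorem pv_copy (header h : List String) (hlen : header.length = h.length) :
    (List.range h.length).foldl (fun a i => a.set i (header.getD i "")) h = header := by
  have := pv_copy_aux header h.length h
  apply List.ext_getElem?
  intro j
  rw [this.2 j]
  by_cases hj : j < h.length
  · simp [hj, List.getD_eq_getElem?_getD, List.getElem?_eq_getElem (by omega : j < header.length)]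
  · simp [hj, List.getElem?_eq_none (by omega : header.length ≤ j)]

-- ===== VERDICT (by name: the statement is the Claim_ definition above) =====
theorem drop_bad_words_from_list_spec : Claim_equal_drop_bad_words_from_list := by
  intro dataset _ hpre
  unfold Spec_drop_bad_words_from_list drop_bad_words_from_list drop_bad_words_from_list_alt
  match dataset with
  | [] => exact absurd rfl hpre
  | h :: t =>
    simp only
    rw [pv_fold_map]
    rw [pv_copy _ _ (by simp)]
    have hfun : (fun s => pvBadWords.foldl (fun s w => PySem.Str.replace s w "") s)
        = (fun s => pvClean s pvBadWords) :=
      funext fun s => (pv_clean_eq_foldl pvBadWords pv_badwords_nonempty s).symm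
    rw [hfun]
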